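-- pv_equiv track=rewrite | github.com/artpromedia/aivo | services/edge-bundler-svc/app/services.py | _is_concurrent
-- ===== SOURCE A (Python) =====
-- def _is_concurrent(clock1: dict[str, int], clock2: dict[str, int]) -> bool:
--     """Check if two vector clocks represent concurrent operations."""
--     # Two clocks are concurrent if neither dominates the other
--     clock1_dominates = all(
--         clock1.get(node, 0) >= clock2.get(node, 0) for node in clock2
--     )
--     clock2_dominates = all(
--         clock2.get(node, 0) >= clock1.get(node, 0) for node in clock1
--     )
--
--     return not (clock1_dominates or clock2_dominates)
-- ===== SOURCE B (Python) =====
-- def _is_concurrent(clock1: dict[str, int], clock2: dict[str, int]) -> bool: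
--     """Check if two vector clocks represent concurrent operations."""
--     # Single fused pass over the union of node sets, accumulating both
--     # directional flags: clock1 strictly ahead somewhere (over clock1's
--     # entries) and clock2 strictly ahead somewhere (over clock2's entries).
--     saw_greater = False
--     saw_less = False
--     for node in clock1.keys() | clock2.keys():
--         v1 = clock1.get(node, 0)
--         v2 = clock2.get(node, 0)
--         if node in clock1 and v1 > v2:
--             saw_greater = True
--         if node in clock2 and v2 > v1:
--             saw_less = True
--     return saw_greater and saw_less
-- ===== Notes on version B (the rewrite author's own statement) =====
-- stated objective: alternative
-- what changed: Replaces the two separate negated all()-dominance comprehensions over two different key sets by one fused pass over the union of the node sets that accumulates both directional strict-advantage flags (saw_greater over clock1's entries, saw_less over clock2's entries) and returns their conjunction.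
import Mathlib
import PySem

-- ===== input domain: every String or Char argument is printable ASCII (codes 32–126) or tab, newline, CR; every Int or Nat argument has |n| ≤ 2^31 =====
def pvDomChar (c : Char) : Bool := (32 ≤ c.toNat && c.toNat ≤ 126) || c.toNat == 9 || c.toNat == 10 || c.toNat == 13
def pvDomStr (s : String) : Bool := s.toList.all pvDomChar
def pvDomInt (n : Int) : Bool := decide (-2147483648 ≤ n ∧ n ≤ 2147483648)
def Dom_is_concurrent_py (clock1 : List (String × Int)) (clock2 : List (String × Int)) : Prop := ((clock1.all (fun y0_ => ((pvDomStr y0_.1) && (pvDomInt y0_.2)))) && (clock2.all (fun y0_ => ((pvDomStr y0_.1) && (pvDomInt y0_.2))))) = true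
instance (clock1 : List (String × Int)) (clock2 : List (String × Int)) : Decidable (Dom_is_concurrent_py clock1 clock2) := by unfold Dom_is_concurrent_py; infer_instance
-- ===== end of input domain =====

-- B: one fused pass over the union of node sets accumulating both directional strict-advantage
-- flags, instead of negating two separate all()-dominance comprehensions; same cost, same value.


-- ===== PORT A =====
-- Port of A: two all() dominance checks over the two key sets, negated.
-- clockX.get(node, 0) -> PySem.Dict.getD.
def is_concurrent_py (clock1 : List (String × Int)) (clock2 : List (String × Int)) : Bool :=
  let clock1_dominates := clock2.all (fun p => PySem.Dict.getD (PySem.Dict.mk clock1) p.1 0 ≥ PySem.Dict.getD (PySem.Dict.mk clock2) p.1 0)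
  let clock2_dominates := clock1.all (fun p => PySem.Dict.getD (PySem.Dict.mk clock2) p.1 0 ≥ PySem.Dict.getD (PySem.Dict.mk clock1) p.1 0)
  !(clock1_dominates || clock2_dominates)

-- ===== PORT B =====
-- Port of B (Source B): one fold over clock1.keys() | clock2.keys() (PySem.Set.union of the key
-- lists) carrying the pair (saw_greater, saw_less); 'node in clockX' -> Dict.contains,
-- clockX.get(node, 0) -> Dict.getD.
def is_concurrent_py_alt (clock1 : List (String × Int)) (clock2 : List (String × Int)) : Bool :=
  let d1 := PySem.Dict.mk clock1
  let d2 := PySem.Dict.mk clock2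
  let nodes := PySem.Set.union (PySem.Set.ofList (clock1.map Prod.fst)) (clock2.map Prod.fst)
  let flags := nodes.foldl (fun (acc : Bool × Bool) node =>
      let v1 := PySem.Dict.getD d1 node 0
      let v2 := PySem.Dict.getD d2 node 0
      (acc.1 || (PySem.Dict.contains d1 node && decide (v1 > v2)),
       acc.2 || (PySem.Dict.contains d2 node && decide (v2 > v1)))) (false, false)
  flags.1 && flags.2

-- ===== PRECONDITION & SPEC =====
def Spec_is_concurrent_py (clock1 : List (String × Int)) (clock2 : List (String × Int)) (out : Bool) : Prop := out = is_concurrent_py_alt clock1 clock2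
instance (clock1 : List (String × Int)) (clock2 : List (String × Int)) (out : Bool) : Decidable (Spec_is_concurrent_py clock1 clock2 out) := by unfold Spec_is_concurrent_py; infer_instance

-- ===== CLAIM (what is proved, stated in full; the proofs are below) =====
def Claim_equal_is_concurrent_py : Prop := ∀ (clock1 : List (String × Int)) (clock2 : List (String × Int)), Dom_is_concurrent_py clock1 clock2 → Spec_is_concurrent_py clock1 clock2 (is_concurrent_py clock1 clock2)

-- ===== LEMMAS AND PROOFS =====

-- The fold carrying a pair of or-accumulated flags is the pair of List.any's.
theorem foldl_or_pair {α : Type} (l : List α) (p q : α → Bool) (a b : Bool) :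
    l.foldl (fun (acc : Bool × Bool) n => (acc.1 || p n, acc.2 || q n)) (a, b)
      = (a || l.any p, b || l.any q) := by
  induction l generalizing a b with
  | nil => simp
  | cons x xs ih => simp [List.foldl_cons, ih, Bool.or_assoc]

-- A guarded ∃ over the key union equals the plain ∃ over that clock's own entries.
theorem any_union_guarded (clock1 clock2 : List (String × Int))
    (r : String → Bool) :
    ((PySem.Set.union (PySem.Set.ofList (clock1.map Prod.fst)) (clock2.map Prod.fst)).any
        (fun node => PySem.Dict.contains (PySem.Dict.mk clock1) node && r node))
      = clock1.any (fun p => r p.1) := by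
  apply Bool.eq_iff_iff.mpr
  simp only [List.any_eq_true, Bool.and_eq_true]
  constructor
  · rintro ⟨n, _, hc, hr⟩
    have hn : n ∈ clock1.map Prod.fst := by
      have := (PySem.Dict.contains_iff_mem_keys _ _).mp hc
      simpa [PySem.Dict.keys_mk] using this
    obtain ⟨p, hp, rfl⟩ := List.mem_map.mp hn
    exact ⟨p, hp, hr⟩
  · rintro ⟨p, hp, hr⟩
    refine ⟨p.1, ?_, ?_, hr⟩
    · simp [PySem.Set.mem_union, PySem.Set.mem_ofList]
      exact Or.inl ⟨p.2, by simpa using hp⟩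
    · apply (PySem.Dict.contains_iff_mem_keys _ _).mpr
      rw [PySem.Dict.keys_mk]
      exact List.mem_map_of_mem hp

-- Same, with the guard/lookup on the second clock (the union is over both key lists either way).
theorem any_union_guarded' (clock1 clock2 : List (String × Int))
    (r : String → Bool) :
    ((PySem.Set.union (PySem.Set.ofList (clock1.map Prod.fst)) (clock2.map Prod.fst)).any
        (fun node => PySem.Dict.contains (PySem.Dict.mk clock2) node && r node))
      = clock2.any (fun p => r p.1) := by
  apply Bool.eq_iff_iff.mpr
  simp only [List.any_eq_true, Bool.and_eq_true]
  constructor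
  · rintro ⟨n, _, hc, hr⟩
    have hn : n ∈ clock2.map Prod.fst := by
      have := (PySem.Dict.contains_iff_mem_keys _ _).mp hc
      simpa [PySem.Dict.keys_mk] using this
    obtain ⟨p, hp, rfl⟩ := List.mem_map.mp hn
    exact ⟨p, hp, hr⟩
  · rintro ⟨p, hp, hr⟩
    refine ⟨p.1, ?_, ?_, hr⟩
    · simp [PySem.Set.mem_union, PySem.Set.mem_ofList]
      exact Or.inr ⟨p.2, by simpa using hp⟩
    · apply (PySem.Dict.contains_iff_mem_keys _ _).mpr
      rw [PySem.Dict.keys_mk]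
      exact List.mem_map_of_mem hp

-- ===== VERDICT (by name: the statement is the Claim_ definition above) =====
theorem is_concurrent_py_spec : Claim_equal_is_concurrent_py := by
  intro clock1 clock2 _
  unfold Spec_is_concurrent_py is_concurrent_py is_concurrent_py_alt
  dsimp only
  rw [foldl_or_pair, any_union_guarded, any_union_guarded']
  simp only [List.all_eq_not_any_not, Bool.not_or, Bool.not_not, ← decide_not, not_le,
    Bool.false_or]
  rw [Bool.and_comm]
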